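-- pv_equiv track=rewrite | github.com/pbrw/chip8-python | utils.py | parse_instruction_args
-- ===== SOURCE A (Python) =====
-- def parse_instruction_args(pattern: str, instr: str) -> [int]:
--     if len(pattern) != len(instr):
--         return None
--     res = []
--     cur = 0
--     for index, char in enumerate(pattern):
--         if char.islower():
--             if index != 0 and pattern[index - 1].islower() and pattern[index - 1] != char:
--                 res.append(cur)
--                 cur = 0
--             cur = cur * 16 + int(instr[index], 16)
--         else:
--             if char != instr[index]:
--                 return None
--             if index != 0 and pattern[index - 1].islower():
--                 res.append(cur)
--                 cur = 0
--     if pattern[-1].islower():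
--         res.append(cur)
--
--     return res
-- ===== SOURCE B (Python) =====
-- def parse_instruction_args(pattern: str, instr: str) -> [int]:
--     # Run-scanner: split pattern into maximal runs of identical characters and
--     # handle each run's slice of instr at once (strict per-digit hex conversion,
--     # since int(seg, 16) would accept spaces/underscores inside a slice).
--     if len(pattern) != len(instr):
--         return None
--     res = []
--     i, n = 0, len(pattern)
--     while i < n:
--         ch = pattern[i]
--         j = i + 1
--         while j < n and pattern[j] == ch:
--             j += 1
--         seg = instr[i:j]
--         if ch.islower():
--             v = 0
--             for c in seg:
--                 v = v * 16 + int(c, 16)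
--             res.append(v)
--         elif seg != ch * (j - i):
--             return None
--         i = j
--     return res
-- ===== Notes on version B (the rewrite author's own statement) =====
-- stated objective: alternative
-- what changed: Replaces A's per-character scan with carry accumulator and pattern[index-1] look-backs by a run-scanner that splits the pattern into maximal runs of identical characters and handles each run's instr slice at once (per-digit hex-parse it if lowercase, compare it to ch*L otherwise); B returns [] where A raises IndexError on pattern='' with instr=''.
-- outside the precondition, e.g. on parse_instruction_args('Ax', 'B '): A returns None, B returns None; on parse_instruction_args('', ''): A raises IndexError, B returns []
import Mathlib
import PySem

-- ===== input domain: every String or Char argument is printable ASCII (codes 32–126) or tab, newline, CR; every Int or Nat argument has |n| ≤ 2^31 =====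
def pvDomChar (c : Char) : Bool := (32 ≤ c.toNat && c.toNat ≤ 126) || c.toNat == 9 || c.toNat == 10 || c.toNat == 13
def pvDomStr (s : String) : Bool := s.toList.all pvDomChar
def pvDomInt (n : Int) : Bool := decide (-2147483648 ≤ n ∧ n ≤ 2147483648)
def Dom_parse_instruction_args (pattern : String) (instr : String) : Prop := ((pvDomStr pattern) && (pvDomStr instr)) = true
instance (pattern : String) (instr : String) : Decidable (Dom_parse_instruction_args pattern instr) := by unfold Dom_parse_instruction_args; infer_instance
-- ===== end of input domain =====

-- B replaces A's per-character scan (carry accumulator + pattern[index-1] look-backs) by a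
-- run-scanner over maximal runs of identical pattern characters; objective: alternative decomposition.

-- ===== PORT A =====
-- int(c, 16) for a single character
def pvHex? (c : Char) : Option Int := PySem.Int.ofCharsBase? [c] 16

-- the for-loop of A over enumerate(pattern); `none` in the [] case models the
-- IndexError of pattern[-1] on an empty pattern (excluded by Pre_), and a failed
-- pyGet?/pvHex? models IndexError/ValueError (excluded by Pre_ as well)
def pvLoopA (pl il : List Char) : List (Int × Char) → List Int → Int → Option (List Int)
  | [], res, cur =>
    match PySem.List.pyGet? pl (-1) with
    | none => none
    | some c => some (if PySem.Chars.islower c then res ++ [cur] else res)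
  | (index, char) :: rest, res, cur =>
    if PySem.Chars.islower char then
      let fl : Bool :=
        (index != 0) &&
          (match PySem.List.pyGet? pl (index - 1) with
           | some p => PySem.Chars.islower p && p != char
           | none => false)
      let res' := if fl then res ++ [cur] else res
      let cur' : Int := if fl then 0 else cur
      match (PySem.List.pyGet? il index).bind pvHex? with
      | none => none
      | some d => pvLoopA pl il rest res' (cur' * 16 + d)
    else
      match PySem.List.pyGet? il index with
      | none => none
      | some ic =>
        if char != ic then none
        else
          let fl : Bool :=
            (index != 0) &&
              (match PySem.List.pyGet? pl (index - 1) with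
               | some p => PySem.Chars.islower p
               | none => false)
          pvLoopA pl il rest (if fl then res ++ [cur] else res) (if fl then 0 else cur)

def parse_instruction_args (pattern : String) (instr : String) : Option (List Int) :=
  let pl := pattern.toList
  let il := instr.toList
  if pl.length ≠ il.length then none
  else pvLoopA pl il (PySem.List.enumerate pl) [] 0

-- ===== PORT B =====
-- the strict per-digit hex conversion of Source B's inner `for c in seg` loop
def pvSegVal? : List Char → Int → Option Int
  | [], v => some v
  | c :: cs, v =>
    match pvHex? c with
    | none => none
    | some d => pvSegVal? cs (v * 16 + d)

-- Source B's while-loop: take the maximal run of the leading character, handle instr's slice at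
-- once; the fuel argument (= |pattern| at the top call, enough since each step consumes ≥ 1
-- pattern character) only makes the recursion structural and is never exhausted
def pvLoopB : Nat → List Char → List Char → List Int → Option (List Int)
  | _, [], _, res => some res
  | 0, _ :: _, _, _ => none
  | fuel + 1, ch :: ps, is, res =>
    let run := ps.takeWhile (· == ch)
    let seg := is.take (run.length + 1)
    if PySem.Chars.islower ch then
      match pvSegVal? seg 0 with
      | none => none
      | some v => pvLoopB fuel (ps.dropWhile (· == ch)) (is.drop (run.length + 1)) (res ++ [v])
    else
      if seg = List.replicate (run.length + 1) ch then
        pvLoopB fuel (ps.dropWhile (· == ch)) (is.drop (run.length + 1)) res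
      else none

def parse_instruction_args_alt (pattern : String) (instr : String) : Option (List Int) :=
  let pl := pattern.toList
  let il := instr.toList
  if pl.length ≠ il.length then none
  else pvLoopB pl.length pl il []

-- ===== PRECONDITION & SPEC =====
-- Pre_ excludes the inputs where A raises: the empty pattern with empty instr (IndexError at
-- pattern[-1]) and, for equal-length inputs, any instr character standing at a lowercase pattern
-- position that is not a hex digit (ValueError from int(c, 16)); it is slightly narrower than
-- A's raise set, since an uppercase mismatch left of a bad digit makes A return None first.
def Pre_parse_instruction_args (pattern : String) (instr : String) : Prop :=
  ¬(pattern = "" ∧ instr = "") ∧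
  (pattern.toList.length = instr.toList.length →
    ∀ pr ∈ pattern.toList.zip instr.toList,
      PySem.Chars.islower pr.1 = true → (pvHex? pr.2).isSome = true)
instance (pattern : String) (instr : String) : Decidable (Pre_parse_instruction_args pattern instr) := by
  unfold Pre_parse_instruction_args; infer_instance

def pvWitness_parse_instruction_args : String × String := ("6xkk", "6A2F")

def Spec_parse_instruction_args (pattern : String) (instr : String) (out : Option (List Int)) : Prop := out = parse_instruction_args_alt pattern instr
instance (pattern : String) (instr : String) (out : Option (List Int)) : Decidable (Spec_parse_instruction_args pattern instr out) := by unfold Spec_parse_instruction_args; infer_instance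

-- ===== CLAIM (what is proved, stated in full; the proofs are below) =====
def Claim_equal_parse_instruction_args : Prop := ∀ (pattern : String) (instr : String), Dom_parse_instruction_args pattern instr → Pre_parse_instruction_args pattern instr → Spec_parse_instruction_args pattern instr (parse_instruction_args pattern instr)

-- ===== LEMMAS AND PROOFS =====

-- the flush tests of A's two branches, as functions of the previous character
def pvFlLow (prev : Option Char) (c : Char) : Bool :=
  match prev with
  | some p => PySem.Chars.islower p && p != c
  | none => false

def pvFlUp (prev : Option Char) : Bool :=
  match prev with
  | some p => PySem.Chars.islower p
  | none => false

lemma pvFlUp_some (p : Char) : pvFlUp (some p) = PySem.Chars.islower p := rfl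
lemma pvFlUp_none : pvFlUp none = false := rfl
lemma pvFlLow_some (p c : Char) : pvFlLow (some p) c = (PySem.Chars.islower p && p != c) := rfl
lemma pvFlLow_none (c : Char) : pvFlLow none c = false := rfl

-- A's loop with the pattern index replaced by the previous character and list tails
def pvLoopA' : Option Char → List Char → List Char → List Int → Int → Option (List Int)
  | prev, [], _, res, cur =>
    match prev with
    | none => none
    | some c => some (if PySem.Chars.islower c then res ++ [cur] else res)
  | prev, c :: ps, is, res, cur =>
    if PySem.Chars.islower c then
      match is.head?.bind pvHex? with
      | none => none
      | some d =>
        pvLoopA' (some c) ps is.tail (if pvFlLow prev c then res ++ [cur] else res)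
          ((if pvFlLow prev c then 0 else cur) * 16 + d)
    else
      match is.head? with
      | none => none
      | some ic =>
        if c != ic then none
        else
          pvLoopA' (some c) ps is.tail (if pvFlUp prev then res ++ [cur] else res)
            (if pvFlUp prev then 0 else cur)

lemma pvPrevGet (p0 : Char) (pr suf : List Char) :
    PySem.List.pyGet? ((p0 :: pr) ++ suf) (((p0 :: pr).length : Int) - 1)
      = (p0 :: pr).getLast? := by
  have h1 : (((p0 :: pr).length : Int) - 1) = ((pr.length : Nat) : Int) := by
    simp only [List.length_cons]; push_cast; omega
  rw [h1, PySem.List.pyGet?_natCast, List.getElem?_append_left (by simp),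
    List.getLast?_eq_getElem?]
  simp

lemma pvBridgeA (il : List Char) :
    ∀ (suf pre : List Char) (res : List Int) (cur : Int),
      pvLoopA (pre ++ suf) il (PySem.List.enumerate suf (pre.length : Int)) res cur
        = pvLoopA' pre.getLast? suf (il.drop pre.length) res cur := by
  intro suf
  induction suf with
  | nil =>
    intro pre res cur
    rw [List.append_nil]
    simp only [PySem.List.enumerate_nil]
    cases hgl : pre.getLast? <;>
      simp [pvLoopA, pvLoopA', PySem.List.pyGet?_neg_one, hgl]
  | cons c suf' ih =>
    intro pre res cur
    have hgetIl : PySem.List.pyGet? il ((pre.length : Nat) : Int) = (il.drop pre.length).head? := by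
      rw [PySem.List.pyGet?_natCast, List.head?_drop]
    have hfl_low : (((pre.length : Int) != 0) &&
        (match PySem.List.pyGet? (pre ++ c :: suf') ((pre.length : Int) - 1) with
         | some p => PySem.Chars.islower p && p != c
         | none => false)) = pvFlLow pre.getLast? c := by
      cases pre with
      | nil => simp [pvFlLow_none]
      | cons p0 pr =>
        have hne : ((((p0 :: pr).length : Nat) : Int) != 0) = true := by
          simp only [ne_eq, bne_iff_ne, List.length_cons]; push_cast; omega
        rw [pvPrevGet p0 pr (c :: suf'), hne, Bool.true_and]
        cases hgl : (p0 :: pr).getLast? with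
        | none => simp [pvFlLow_none]
        | some p => simp [pvFlLow_some]
    have hfl_up : (((pre.length : Int) != 0) &&
        (match PySem.List.pyGet? (pre ++ c :: suf') ((pre.length : Int) - 1) with
         | some p => PySem.Chars.islower p
         | none => false)) = pvFlUp pre.getLast? := by
      cases pre with
      | nil => simp [pvFlUp_none]
      | cons p0 pr =>
        have hne : ((((p0 :: pr).length : Nat) : Int) != 0) = true := by
          simp only [ne_eq, bne_iff_ne, List.length_cons]; push_cast; omega
        rw [pvPrevGet p0 pr (c :: suf'), hne, Bool.true_and]
        cases hgl : (p0 :: pr).getLast? with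
        | none => simp [pvFlUp_none]
        | some p => simp [pvFlUp_some]
    have heq : ∀ (r : List Int) (u : Int),
        pvLoopA (pre ++ c :: suf') il (PySem.List.enumerate suf' ((pre.length : Int) + 1)) r u
          = pvLoopA' (some c) suf' ((il.drop pre.length).tail) r u := by
      intro r u
      have h2 := ih (pre ++ [c]) r u
      have e1 : (pre ++ [c]) ++ suf' = pre ++ c :: suf' := by simp
      have e2 : (((pre ++ [c]).length : Nat) : Int) = (pre.length : Int) + 1 := by
        simp
      have e3 : (pre ++ [c]).getLast? = some c := List.getLast?_concat
      have e4 : il.drop (pre ++ [c]).length = (il.drop pre.length).tail := by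
        rw [List.tail_drop]; simp
      rw [e1, e2, e3, e4] at h2
      exact h2
    rw [PySem.List.enumerate_cons, pvLoopA, pvLoopA']
    simp only [hgetIl, hfl_low, hfl_up, heq]

lemma pvRunSplit (ch : Char) (ps : List Char) :
    ∃ k rest, ps = List.replicate k ch ++ rest ∧ rest.head? ≠ some ch ∧
      ps.takeWhile (· == ch) = List.replicate k ch ∧ ps.dropWhile (· == ch) = rest := by
  induction ps with
  | nil => exact ⟨0, [], by simp⟩
  | cons a t ih =>
    by_cases ha : a = ch
    · obtain ⟨k, rest, h1, h2, h3, h4⟩ := ih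
      subst ha
      exact ⟨k + 1, rest, by simp [List.replicate_succ, h1], h2,
        by simp [List.replicate_succ, h3], by simp [h4]⟩
    · exact ⟨0, a :: t, by simp, by simp [ha], by simp [ha], by simp [ha]⟩

lemma pvLowRunA (ch : Char) (hl : PySem.Chars.islower ch = true) :
    ∀ (k : Nat) (rest is : List Char) (res : List Int) (acc : Int), k ≤ is.length →
      pvLoopA' (some ch) (List.replicate k ch ++ rest) is res acc
        = match pvSegVal? (is.take k) acc with
          | none => none
          | some v => pvLoopA' (some ch) rest (is.drop k) res v := by
  intro k
  induction k with
  | zero =>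
    intro rest is res acc _
    simp [pvSegVal?]
  | succ k ih =>
    intro rest is res acc h
    cases is with
    | nil => simp at h
    | cons a is' =>
      rw [List.replicate_succ, List.cons_append, pvLoopA']
      simp only [hl, if_true, List.head?_cons, List.tail_cons, Option.bind, pvFlLow_some,
        bne_self_eq_false, Bool.and_false, Bool.false_eq_true, if_false,
        List.take_succ_cons, List.drop_succ_cons]
      cases hx : pvHex? a with
      | none => simp [pvSegVal?, hx]
      | some d =>
        simp only [pvSegVal?, hx]
        exact ih rest is' res (acc * 16 + d) (by simpa using h)

lemma pvUpRunA (ch : Char) (hl : PySem.Chars.islower ch = false) :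
    ∀ (k : Nat) (rest is : List Char) (res : List Int),
      pvLoopA' (some ch) (List.replicate k ch ++ rest) is res 0
        = if is.take k = List.replicate k ch then pvLoopA' (some ch) rest (is.drop k) res 0
          else none := by
  intro k
  induction k with
  | zero =>
    intro rest is res
    simp
  | succ k ih =>
    intro rest is res
    cases is with
    | nil =>
      rw [List.replicate_succ, List.cons_append, pvLoopA']
      simp [hl]
    | cons a is' =>
      rw [List.replicate_succ, List.cons_append, pvLoopA']
      simp only [hl, if_false, Bool.false_eq_true, List.head?_cons, List.tail_cons,
        List.take_succ_cons, List.drop_succ_cons, List.replicate_succ, List.cons.injEq]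
      by_cases hac : ch = a
      · subst hac
        simp only [pvFlUp_some, bne_self_eq_false, if_false, Bool.false_eq_true, hl]
        rw [ih rest is' res]
        simp
      · have : ch != a := by simp [hac]
        simp [this, Ne.symm hac]

def pvFlush (prev : Option Char) (res : List Int) (cur : Int) : List Int :=
  match prev with
  | none => res
  | some p => if PySem.Chars.islower p then res ++ [cur] else res

lemma pvFlushLowEq (prev : Option Char) (res : List Int) (cur : Int) (ch : Char)
    (hhd : ∀ p, prev = some p → p ≠ ch) :
    (if pvFlLow prev ch then res ++ [cur] else res) = pvFlush prev res cur := by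
  cases prev with
  | none => rfl
  | some p =>
    have h : (p != ch) = true := by simp [hhd p rfl]
    simp [pvFlLow_some, pvFlush, h]

lemma pvFlLowCur (prev : Option Char) (cur : Int) (ch : Char)
    (h0 : prev = none → cur = 0)
    (hinv : ∀ p, prev = some p → PySem.Chars.islower p = true ∨ cur = 0)
    (hhd : ∀ p, prev = some p → p ≠ ch) :
    (if pvFlLow prev ch then (0:Int) else cur) = 0 := by
  cases prev with
  | none => simpa [pvFlLow_none] using h0 rfl
  | some p =>
    have h : (p != ch) = true := by simp [hhd p rfl]
    rcases hinv p rfl with hc | hc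
    · simp [pvFlLow_some, h, hc]
    · simp [pvFlLow_some, hc]

lemma pvFlushUpEq (prev : Option Char) (res : List Int) (cur : Int) :
    (if pvFlUp prev then res ++ [cur] else res) = pvFlush prev res cur := by
  cases prev with
  | none => rfl
  | some p => simp [pvFlUp_some, pvFlush]

lemma pvFlUpCur (prev : Option Char) (cur : Int)
    (h0 : prev = none → cur = 0)
    (hinv : ∀ p, prev = some p → PySem.Chars.islower p = true ∨ cur = 0) :
    (if pvFlUp prev then (0:Int) else cur) = 0 := by
  cases prev with
  | none => simpa [pvFlUp_none] using h0 rfl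
  | some p =>
    rcases hinv p rfl with hc | hc
    · simp [pvFlUp_some, hc]
    · simp [pvFlUp_some, hc]

lemma pvRunEq :
    ∀ (fuel : Nat) (pat is : List Char) (res : List Int) (cur : Int) (prev : Option Char),
      pat.length ≤ fuel → pat.length = is.length →
      (prev = none → pat ≠ [] ∧ cur = 0) →
      (∀ p, prev = some p → PySem.Chars.islower p = true ∨ cur = 0) →
      (∀ p, prev = some p → pat.head? ≠ some p) →
      pvLoopA' prev pat is res cur = pvLoopB fuel pat is (pvFlush prev res cur) := by
  intro fuel
  induction fuel with
  | zero =>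
    intro pat is res cur prev hf _ h0 _ _
    have hp : pat = [] := List.length_eq_zero_iff.mp (Nat.le_zero.mp hf)
    subst hp
    cases prev with
    | none => exact ((h0 rfl).1 rfl).elim
    | some p => simp [pvLoopA', pvLoopB, pvFlush]
  | succ fuel ih =>
    intro pat is res cur prev hf hlen h0 hinv hhd
    cases pat with
    | nil =>
      cases prev with
      | none => exact ((h0 rfl).1 rfl).elim
      | some p => simp [pvLoopA', pvLoopB, pvFlush]
    | cons ch ps =>
      obtain ⟨k, rest, hps, hrh, htw, hdw⟩ := pvRunSplit ch ps
      cases is with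
      | nil => simp at hlen
      | cons a is' =>
        have hlen' : ps.length = is'.length := by simpa using hlen
        have hkr : ps.length = k + rest.length := by
          have := congrArg List.length hps; simpa using this
        have hk : k ≤ is'.length := by omega
        have hfuel : rest.length ≤ fuel := by
          have : (ch :: ps).length ≤ fuel + 1 := hf
          simp at this; omega
        have hlenr : rest.length = (is'.drop k).length := by
          simp [List.length_drop]; omega
        have hhd' : ∀ p, prev = some p → p ≠ ch := fun p hp hpc => (hhd p hp) (by simp [hpc])
        by_cases hlow : PySem.Chars.islower ch = true
        · rw [pvLoopA']
          simp only [hlow, if_true, List.head?_cons, List.tail_cons, Option.bind,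
            pvFlushLowEq prev res cur ch hhd', pvFlLowCur prev cur ch (fun h => (h0 h).2) hinv hhd']
          rw [pvLoopB]
          simp only [htw, hdw, hlow, if_true, List.length_replicate,
            List.take_succ_cons, List.drop_succ_cons, pvSegVal?]
          cases hx : pvHex? a with
          | none => rfl
          | some d =>
            dsimp only
            rw [hps, pvLowRunA ch hlow k rest is' (pvFlush prev res cur) (0 * 16 + d) hk]
            cases hs : pvSegVal? (is'.take k) (0 * 16 + d) with
            | none => rfl
            | some v =>
              dsimp only
              rw [ih rest (is'.drop k) (pvFlush prev res cur) v (some ch) hfuel hlenr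
                (by intro h; cases h)
                (fun p hp => by cases hp; exact Or.inl hlow)
                (fun p hp => by cases hp; exact hrh)]
              simp [pvFlush, hlow]
        · have hlow' : PySem.Chars.islower ch = false := by simpa using hlow
          rw [pvLoopA']
          simp only [hlow', if_false, Bool.false_eq_true, List.head?_cons, List.tail_cons,
            pvFlushUpEq prev res cur, pvFlUpCur prev cur (fun h => (h0 h).2) hinv]
          rw [pvLoopB]
          simp only [htw, hdw, hlow', List.length_replicate, List.take_succ_cons,
            List.drop_succ_cons, List.replicate_succ, List.cons.injEq,
            Bool.false_eq_true, if_false]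
          by_cases hac : ch = a
          · subst hac
            simp only [bne_self_eq_false, Bool.false_eq_true, if_false, true_and]
            rw [hps, pvUpRunA ch hlow' k rest is' (pvFlush prev res cur)]
            by_cases hrep : is'.take k = List.replicate k ch
            · simp only [hrep, if_true]
              rw [ih rest (is'.drop k) (pvFlush prev res cur) 0 (some ch) hfuel hlenr
                (by intro h; cases h)
                (fun p hp => by cases hp; exact Or.inr rfl)
                (fun p hp => by cases hp; exact hrh)]
              simp [pvFlush, hlow']
            · simp [hrep]
          · have hne : (ch != a) = true := by simp [hac]
            have hne' : ¬ (a = ch) := fun h => hac h.symm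
            simp [hne, hne']

-- ===== VERDICT (by name: the statement is the Claim_ definition above) =====
theorem parse_instruction_args_spec : Claim_equal_parse_instruction_args := by
  intro pattern instr _ hpre
  unfold Spec_parse_instruction_args parse_instruction_args parse_instruction_args_alt
  by_cases hlen : pattern.toList.length = instr.toList.length
  · rw [if_neg (not_not_intro hlen), if_neg (not_not_intro hlen)]
    by_cases hp : pattern.toList = []
    · have hi : instr.toList = [] := by
        rw [hp] at hlen
        exact List.length_eq_zero_iff.mp hlen.symm
      exact absurd ⟨String.toList_eq_nil_iff.mp hp, String.toList_eq_nil_iff.mp hi⟩ hpre.1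
    · have hb := pvBridgeA instr.toList (pattern.toList) ([] : List Char) [] 0
      simp only [List.nil_append, List.length_nil, Nat.cast_zero, List.drop_zero,
        List.getLast?_nil] at hb
      rw [hb]
      rw [pvRunEq pattern.toList.length pattern.toList instr.toList [] 0 none le_rfl hlen
        (fun _ => ⟨hp, rfl⟩) (fun p h => by cases h) (fun p h => by cases h)]
      rfl
  · rw [if_pos hlen, if_pos hlen]
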